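-- pv_equiv track=rewrite | github.com/agnesgriselda/Project-TS-Kelompok8-Kriptografi-B | mini_aes_decrypt.py | inverse_mix_columns
-- ===== SOURCE A (Python) =====
-- def inverse_mix_columns(state):
--     def multiply(a, b):
--         p = 0
--         for _ in range(4):
--             if b & 1:
--                 p ^= a
--             carry = a & 0x8
--             a <<= 1
--             if carry:
--                 a ^= 0x13
--             b >>= 1
--         return p & 0xF
--
--     new_state = [
--         multiply(state[0], 9) ^ multiply(state[2], 2),
--         multiply(state[1], 9) ^ multiply(state[3], 2),
--         multiply(state[0], 2) ^ multiply(state[2], 9),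
--         multiply(state[1], 2) ^ multiply(state[3], 9)
--     ]
--     return new_state
-- ===== SOURCE B (Python) =====
-- # GF(2^4) multiplication by 2 and 9 as precomputed 16-entry lookup tables,
-- # replacing the bit-serial multiply loop with direct indexing.
-- MUL2 = [0, 2, 4, 6, 8, 10, 12, 14, 3, 1, 7, 5, 11, 9, 15, 13]
-- MUL9 = [0, 9, 1, 8, 2, 11, 3, 10, 4, 13, 5, 12, 6, 15, 7, 14]
--
-- def inverse_mix_columns(state):
--     s0 = state[0] & 0xF
--     s1 = state[1] & 0xF
--     s2 = state[2] & 0xF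
--     s3 = state[3] & 0xF
--     return [
--         MUL9[s0] ^ MUL2[s2],
--         MUL9[s1] ^ MUL2[s3],
--         MUL2[s0] ^ MUL9[s2],
--         MUL2[s1] ^ MUL9[s3],
--     ]
-- ===== Notes on version B (the rewrite author's own statement) =====
-- stated objective: idiomatic
-- what changed: Replaces the bit-serial 4-iteration GF(2^4) multiply loop with two precomputed 16-entry lookup tables (multiplication by 2 and by 9) indexed by the nibble value state[i] & 0xF, so no inner loop remains.
import Mathlib
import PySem

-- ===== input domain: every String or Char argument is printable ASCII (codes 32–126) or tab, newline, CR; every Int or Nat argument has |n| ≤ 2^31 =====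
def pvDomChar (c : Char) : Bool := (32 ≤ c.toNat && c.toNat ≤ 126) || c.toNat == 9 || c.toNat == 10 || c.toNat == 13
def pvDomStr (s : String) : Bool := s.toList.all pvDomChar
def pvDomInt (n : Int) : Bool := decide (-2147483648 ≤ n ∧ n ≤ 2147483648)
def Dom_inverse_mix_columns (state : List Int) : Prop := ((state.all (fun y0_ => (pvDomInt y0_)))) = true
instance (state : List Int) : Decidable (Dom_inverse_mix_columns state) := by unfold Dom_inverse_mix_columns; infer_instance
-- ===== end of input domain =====

-- B replaces A's bit-serial GF(2^4) multiply loop with two precomputed 16-entry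
-- lookup tables indexed by the nibble value (idiomatic; no inner loop).

-- ===== PORT A =====
-- inner helper `multiply(a, b)`: bit-serial GF(2^4) multiplication, 4 loop iterations
def pvMultiply (a b : Int) : Int :=
  let s := (List.range 4).foldl (fun (s : Int × Int × Int) _ =>
    let p := s.1
    let a := s.2.1
    let b := s.2.2
    let p := if PySem.Int.band b 1 ≠ 0 then PySem.Int.bxor p a else p
    let carry := PySem.Int.band a 8
    let a := a <<< (1 : Nat)
    let a := if carry ≠ 0 then PySem.Int.bxor a 19 else a
    let b := b >>> (1 : Nat)
    (p, a, b)) (0, a, b)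
  PySem.Int.band s.1 15

def inverse_mix_columns (state : List Int) : List Int :=
  [ PySem.Int.bxor (pvMultiply (PySem.List.pyGetD state 0 0) 9) (pvMultiply (PySem.List.pyGetD state 2 0) 2),
    PySem.Int.bxor (pvMultiply (PySem.List.pyGetD state 1 0) 9) (pvMultiply (PySem.List.pyGetD state 3 0) 2),
    PySem.Int.bxor (pvMultiply (PySem.List.pyGetD state 0 0) 2) (pvMultiply (PySem.List.pyGetD state 2 0) 9),
    PySem.Int.bxor (pvMultiply (PySem.List.pyGetD state 1 0) 2) (pvMultiply (PySem.List.pyGetD state 3 0) 9) ]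

-- ===== PORT B =====
def pvMUL2 : List Int := [0, 2, 4, 6, 8, 10, 12, 14, 3, 1, 7, 5, 11, 9, 15, 13]
def pvMUL9 : List Int := [0, 9, 1, 8, 2, 11, 3, 10, 4, 13, 5, 12, 6, 15, 7, 14]

def inverse_mix_columns_alt (state : List Int) : List Int :=
  let s0 := PySem.Int.band (PySem.List.pyGetD state 0 0) 15
  let s1 := PySem.Int.band (PySem.List.pyGetD state 1 0) 15
  let s2 := PySem.Int.band (PySem.List.pyGetD state 2 0) 15
  let s3 := PySem.Int.band (PySem.List.pyGetD state 3 0) 15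
  [ PySem.Int.bxor (PySem.List.pyGetD pvMUL9 s0 0) (PySem.List.pyGetD pvMUL2 s2 0),
    PySem.Int.bxor (PySem.List.pyGetD pvMUL9 s1 0) (PySem.List.pyGetD pvMUL2 s3 0),
    PySem.Int.bxor (PySem.List.pyGetD pvMUL2 s0 0) (PySem.List.pyGetD pvMUL9 s2 0),
    PySem.Int.bxor (PySem.List.pyGetD pvMUL2 s1 0) (PySem.List.pyGetD pvMUL9 s3 0) ]

-- ===== PRECONDITION & SPEC =====
-- Python A raises IndexError on lists with fewer than 4 elements (state[0]..state[3]).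
def Pre_inverse_mix_columns (state : List Int) : Prop := 4 ≤ state.length
instance (state : List Int) : Decidable (Pre_inverse_mix_columns state) := by unfold Pre_inverse_mix_columns; infer_instance
def pvWitness_inverse_mix_columns : List Int := [1, 2, 3, 4]

def Spec_inverse_mix_columns (state : List Int) (out : List Int) : Prop := out = inverse_mix_columns_alt state
instance (state : List Int) (out : List Int) : Decidable (Spec_inverse_mix_columns state out) := by unfold Spec_inverse_mix_columns; infer_instance

-- ===== CLAIM (what is proved, stated in full; the proofs are below) =====
def Claim_equal_inverse_mix_columns : Prop := ∀ (state : List Int), Dom_inverse_mix_columns state → Pre_inverse_mix_columns state → Spec_inverse_mix_columns state (inverse_mix_columns state)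

-- ===== LEMMAS AND PROOFS =====

-- one update of `a` inside A's loop (carry test, shift, conditional reduction by 0x13)
def pvStep (a : Int) : Int :=
  if PySem.Int.band a 8 ≠ 0 then PySem.Int.bxor (a <<< (1 : Nat)) 19 else a <<< (1 : Nat)

theorem pv_band15 (a : Int) : PySem.Int.band a 15 = a % 16 := by
  by_cases h : (0 : Int) ≤ a
  · simp only [PySem.Int.band, if_pos h, if_pos (by norm_num : (0:Int) ≤ 15), show (15:Int).toNat = 15 from rfl]
    have := Nat.and_two_pow_sub_one_eq_mod a.toNat 4
    norm_num at this
    omega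
  · simp only [PySem.Int.band, if_neg h, if_pos (by norm_num : (0:Int) ≤ 15), show (15:Int).toNat = 15 from rfl]
    have := Nat.and_two_pow_sub_one_eq_mod (-a - 1).toNat 4
    rw [(by norm_num : (2:Nat)^4 - 1 = 15), (by norm_num : (2:Nat)^4 = 16), Nat.land_comm] at this
    omega

theorem pv_and8 (n : Nat) : n &&& 8 = if n % 16 < 8 then 0 else 8 := by
  have h1 := Nat.and_two_pow n 3
  have h2 : n.testBit 3 = decide (8 ≤ n % 16) := by
    rw [Nat.testBit_eq_decide_div_mod_eq]
    rcases Nat.lt_or_ge (n % 16) 8 with h | h <;> simp <;> omega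
  rw [h2] at h1
  norm_num at h1
  by_cases h : 8 ≤ n % 16
  · rw [if_neg (by omega)]
    simp [h] at h1
    omega
  · rw [if_pos (by omega)]
    simp [h] at h1
    exact h1

theorem pv_band8 (a : Int) : PySem.Int.band a 8 = if a % 16 < 8 then 0 else 8 := by
  by_cases h : (0 : Int) ≤ a
  · simp only [PySem.Int.band, if_pos h, if_pos (by norm_num : (0:Int) ≤ 8), show (8:Int).toNat = 8 from rfl]
    have := pv_and8 a.toNat
    split_ifs at this ⊢ <;> omega
  · simp only [PySem.Int.band, if_neg h, if_pos (by norm_num : (0:Int) ≤ 8), show (8:Int).toNat = 8 from rfl]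
    have := pv_and8 (-a - 1).toNat
    rw [Nat.land_comm] at this
    split_ifs at this ⊢ <;> omega

theorem pv_flip (v : Nat) (h : v < 16) : v ^^^ 15 = 15 - v := by
  interval_cases v <;> decide

theorem pv_xor_lt (u v : Nat) (hu : u < 16) (hv : v < 16) : u ^^^ v < 16 := by
  have hu' : u < 2 ^ 4 := by simpa using hu
  have hv' : v < 2 ^ 4 := by simpa using hv
  have := Nat.xor_lt_two_pow hu' hv'
  simpa using this

theorem pv_flipR (u v : Nat) (hu : u < 16) (hv : v < 16) : u ^^^ (15 - v) = 15 - (u ^^^ v) := by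
  rw [← pv_flip v hv, ← Nat.xor_assoc, pv_flip _ (pv_xor_lt u v hu hv)]

theorem pv_flipL (u v : Nat) (hu : u < 16) (hv : v < 16) : (15 - u) ^^^ v = 15 - (u ^^^ v) := by
  rw [Nat.xor_comm, pv_flipR v u hv hu, Nat.xor_comm]

theorem pv_flipB (u v : Nat) (hu : u < 16) (hv : v < 16) : (15 - u) ^^^ (15 - v) = u ^^^ v := by
  rw [pv_flipL u _ hu (by omega), pv_flipR u v hu hv]
  have := pv_xor_lt u v hu hv
  omega

theorem pv_xor_mod (u v : Nat) : (u ^^^ v) % 16 = (u % 16) ^^^ (v % 16) := by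
  have := Nat.xor_mod_two_pow (a := u) (b := v) (n := 4)
  norm_num at this
  exact this

theorem pv_bxor_mod (x y : Int) :
    PySem.Int.bxor x y % 16 = ((x % 16).toNat ^^^ (y % 16).toNat : Nat) := by
  have h16 : (0:Nat) < 16 := by norm_num
  by_cases hx : (0 : Int) ≤ x <;> by_cases hy : (0 : Int) ≤ y
  · simp only [PySem.Int.bxor, if_pos hx, if_pos hy]
    have h := pv_xor_mod x.toNat y.toNat
    have hux : (x % 16).toNat = x.toNat % 16 := by omega
    have huy : (y % 16).toNat = y.toNat % 16 := by omega
    rw [hux, huy, ← h]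
    omega
  · simp only [PySem.Int.bxor, if_pos hx, if_neg hy]
    have h := pv_xor_mod x.toNat (-y - 1).toNat
    have hux : (x % 16).toNat = x.toNat % 16 := by omega
    have huy : (y % 16).toNat = 15 - (-y - 1).toNat % 16 := by omega
    rw [hux, huy, pv_flipR _ _ (Nat.mod_lt _ h16) (Nat.mod_lt _ h16), ← h]
    omega
  · simp only [PySem.Int.bxor, if_neg hx, if_pos hy]
    have h := pv_xor_mod (-x - 1).toNat y.toNat
    have hux : (x % 16).toNat = 15 - (-x - 1).toNat % 16 := by omega
    have huy : (y % 16).toNat = y.toNat % 16 := by omega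
    rw [hux, huy, pv_flipL _ _ (Nat.mod_lt _ h16) (Nat.mod_lt _ h16), ← h]
    omega
  · simp only [PySem.Int.bxor, if_neg hx, if_neg hy]
    have h := pv_xor_mod (-x - 1).toNat (-y - 1).toNat
    have hux : (x % 16).toNat = 15 - (-x - 1).toNat % 16 := by omega
    have huy : (y % 16).toNat = 15 - (-y - 1).toNat % 16 := by omega
    rw [hux, huy, pv_flipB _ _ (Nat.mod_lt _ h16) (Nat.mod_lt _ h16), ← h]
    omega

theorem pv_shift_mod (x y : Int) (h : x % 16 = y % 16) :
    (x <<< (1 : Nat)) % 16 = (y <<< (1 : Nat)) % 16 := by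
  rw [Int.shiftLeft_eq, Int.shiftLeft_eq]
  norm_num
  omega

theorem pv_step_mod (x y : Int) (h : x % 16 = y % 16) : pvStep x % 16 = pvStep y % 16 := by
  unfold pvStep
  rw [pv_band8 x, pv_band8 y, h]
  split_ifs <;>
    first
      | exact pv_shift_mod x y h
      | rw [pv_bxor_mod, pv_bxor_mod, pv_shift_mod x y h]

theorem pv_unroll9 (a : Int) :
    pvMultiply a 9 = PySem.Int.band (PySem.Int.bxor (PySem.Int.bxor 0 a) (pvStep (pvStep (pvStep a)))) 15 := by
  have e1 : PySem.Int.band (9:Int) 1 = 1 := by decide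
  have e2 : (9:Int) >>> (1:Nat) = 4 := by decide
  have e3 : PySem.Int.band (4:Int) 1 = 0 := by decide
  have e4 : (4:Int) >>> (1:Nat) = 2 := by decide
  have e5 : PySem.Int.band (2:Int) 1 = 0 := by decide
  have e6 : (2:Int) >>> (1:Nat) = 1 := by decide
  simp [pvMultiply, pvStep, List.range_succ, e1, e2, e3, e4, e5, e6]

theorem pv_unroll2 (a : Int) :
    pvMultiply a 2 = PySem.Int.band (PySem.Int.bxor 0 (pvStep a)) 15 := by
  have e5 : PySem.Int.band (2:Int) 1 = 0 := by decide
  have e6 : (2:Int) >>> (1:Nat) = 1 := by decide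
  have e8 : (1:Int) >>> (1:Nat) = 0 := by decide
  have e9 : PySem.Int.band (0:Int) 1 = 0 := by decide
  have e10 : (0:Int) >>> (1:Nat) = 0 := by decide
  simp [pvMultiply, pvStep, List.range_succ, e5, e6, e8, e9, e10]

theorem pv_zero_bxor (a : Int) : PySem.Int.bxor 0 a = a := by
  rw [PySem.Int.bxor_comm, PySem.Int.bxor_zero]

theorem pv_mul9 (a : Int) :
    pvMultiply a 9 = PySem.List.pyGetD pvMUL9 (PySem.Int.band a 15) 0 := by
  obtain ⟨r, h0, h16, hr⟩ : ∃ r : Int, 0 ≤ r ∧ r < 16 ∧ a % 16 = r :=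
    ⟨a % 16, Int.emod_nonneg a (by norm_num), by omega, rfl⟩
  have key : pvMultiply a 9 = pvMultiply r 9 := by
    rw [pv_unroll9, pv_unroll9, pv_zero_bxor, pv_zero_bxor, pv_band15, pv_band15,
        pv_bxor_mod, pv_bxor_mod]
    have h3 : pvStep (pvStep (pvStep a)) % 16 = pvStep (pvStep (pvStep r)) % 16 :=
      pv_step_mod _ _ (pv_step_mod _ _ (pv_step_mod _ _ (by omega)))
    rw [show a % 16 = r % 16 by omega, h3]
  rw [key, pv_band15, hr]
  interval_cases r <;> decide

theorem pv_mul2 (a : Int) :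
    pvMultiply a 2 = PySem.List.pyGetD pvMUL2 (PySem.Int.band a 15) 0 := by
  obtain ⟨r, h0, h16, hr⟩ : ∃ r : Int, 0 ≤ r ∧ r < 16 ∧ a % 16 = r :=
    ⟨a % 16, Int.emod_nonneg a (by norm_num), by omega, rfl⟩
  have key : pvMultiply a 2 = pvMultiply r 2 := by
    rw [pv_unroll2, pv_unroll2, pv_zero_bxor, pv_zero_bxor, pv_band15, pv_band15]
    have h1 : pvStep a % 16 = pvStep r % 16 := pv_step_mod _ _ (by omega)
    rw [h1]
  rw [key, pv_band15, hr]
  interval_cases r <;> decide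

-- ===== VERDICT (by name: the statement is the Claim_ definition above) =====
theorem inverse_mix_columns_spec : Claim_equal_inverse_mix_columns := by
  intro state _ _
  unfold Spec_inverse_mix_columns inverse_mix_columns inverse_mix_columns_alt
  simp only [pv_mul9, pv_mul2]
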